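-- pv_equiv track=rewrite | github.com/shs9509/Algorithm | 프로그래머스/Level1/신고 결과 받기.py | solution
-- ===== SOURCE A (Python) =====
-- def solution(id_list, report, k):
--     answer = []
--     reported_time={}
--     report_people={}
--     report = list(set(report))
--     for j in id_list:
--         reported_time[j]=0
--         report_people[j]=[]
--     for i in report:
--         person1, person2 = i.split(' ')
--         reported_time[person2]+=1
--         report_people[person1].append(person2)
--
--     for m in report_people:
--         count =0
--         for l in report_people[m]:
--             if reported_time[l]>=k:
--                 count+=1
--         answer.append(count)
--
--     return answer
-- ===== SOURCE B (Python) =====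
-- def solution(id_list, report, k):
--     reporters_of = {}
--     for r in set(report):
--         src, tgt = r.split(' ')
--         reporters_of.setdefault(tgt, []).append(src)
--     credit = dict.fromkeys(id_list, 0)
--     for srcs in reporters_of.values():
--         if len(srcs) >= k:
--             for src in srcs:
--                 credit[src] += 1
--     return list(credit.values())
-- ===== Notes on version B (the rewrite author's own statement) =====
-- stated objective: alternative
-- what changed: B inverts the index: instead of counting reports per target and then scanning each reporter's target list against a threshold, it groups deduplicated reports by the reported user (target -> list of its reporters), declares a target banned when its reporter group has length >= k, and distributes one credit to every reporter in each banned group.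
import Mathlib
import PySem

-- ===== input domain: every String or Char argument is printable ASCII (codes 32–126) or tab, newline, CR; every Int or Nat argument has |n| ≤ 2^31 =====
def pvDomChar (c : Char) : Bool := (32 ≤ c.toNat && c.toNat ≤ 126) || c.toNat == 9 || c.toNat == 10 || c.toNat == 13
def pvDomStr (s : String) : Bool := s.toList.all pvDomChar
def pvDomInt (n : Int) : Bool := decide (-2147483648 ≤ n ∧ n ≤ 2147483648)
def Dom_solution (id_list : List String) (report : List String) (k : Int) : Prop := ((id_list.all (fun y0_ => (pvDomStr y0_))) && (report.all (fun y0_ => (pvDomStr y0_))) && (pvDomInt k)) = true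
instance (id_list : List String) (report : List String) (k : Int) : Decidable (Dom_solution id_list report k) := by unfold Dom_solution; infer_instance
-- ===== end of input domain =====

-- B inverts A's index: it groups the deduplicated reports by the REPORTED user (target → its
-- reporters), bans a target when its reporter group has length ≥ k, and distributes one credit
-- to every reporter in each banned group (objective: alternative). Set/dict iteration: both
-- results are independent of Python's set order.

-- ===== PORT A =====
def solution (id_list : List String) (report : List String) (k : Int) : List Int :=
  let rep : List String := PySem.Set.ofList report
  let rt0 : PySem.Dict String Int := id_list.foldl (fun d j => d.insert j 0) PySem.Dict.empty
  let rp0 : PySem.Dict String (List String) := id_list.foldl (fun d j => d.insert j []) PySem.Dict.empty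
  -- reported_time[person2]+=1 / report_people[person1].append(person2): under Pre_ the keys
  -- exist, so Dict.modify (default never used) is exact where Python does not raise
  let st := rep.foldl (fun (st : PySem.Dict String Int × PySem.Dict String (List String)) i =>
      let parts := (PySem.Str.split? i " ").getD []
      let person1 := parts.getD 0 ""
      let person2 := parts.getD 1 ""
      (st.1.modify person2 0 (· + 1), st.2.modify person1 [] (· ++ [person2]))) (rt0, rp0)
  st.2.keys.foldl (fun answer m =>
      answer ++ [(st.2.getD m []).foldl (fun count l => if k ≤ st.1.getD l 0 then count + 1 else count) (0 : Int)]) []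

-- ===== PORT B =====
def solution_alt (id_list : List String) (report : List String) (k : Int) : List Int :=
  -- reporters_of.setdefault(tgt, []).append(src) sets reporters_of[tgt] to its old value
  -- (default []) with src appended: exactly Dict.modify tgt [] (· ++ [src])
  let reporters_of : PySem.Dict String (List String) :=
    (PySem.Set.ofList report).foldl (fun d r =>
      let ps := (PySem.Str.split? r " ").getD []
      d.modify (ps.getD 1 "") [] (· ++ [ps.getD 0 ""])) PySem.Dict.empty
  let credit0 : PySem.Dict String Int := id_list.foldl (fun d j => d.insert j 0) PySem.Dict.empty
  let credit := reporters_of.values.foldl (fun d srcs =>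
      if k ≤ (srcs.length : Int) then srcs.foldl (fun d s => d.insert s (d.getD s 0 + 1)) d else d) credit0
  credit.values

-- ===== PRECONDITION & SPEC =====
-- Pre_ excludes exactly the inputs on which A raises: a report string that does not split on a
-- single space into two parts, or whose reporter/reported name is not in id_list (KeyError/ValueError).
def Pre_solution (id_list : List String) (report : List String) (k : Int) : Prop :=
  report.all (fun s => match PySem.Str.split? s " " with
    | some [p1, p2] => id_list.contains p1 && id_list.contains p2
    | _ => false) = true
instance (id_list : List String) (report : List String) (k : Int) : Decidable (Pre_solution id_list report k) := by unfold Pre_solution; infer_instance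
def pvWitness_solution : List String × List String × Int := (["muzi", "frodo", "apeach"], ["muzi frodo", "apeach muzi", "muzi frodo"], 1)

def Spec_solution (id_list : List String) (report : List String) (k : Int) (out : List Int) : Prop := out = solution_alt id_list report k
instance (id_list : List String) (report : List String) (k : Int) (out : List Int) : Decidable (Spec_solution id_list report k out) := by unfold Spec_solution; infer_instance

-- ===== CLAIM (what is proved, stated in full; the proofs are below) =====
def Claim_equal_solution : Prop := ∀ (id_list : List String) (report : List String) (k : Int), Dom_solution id_list report k → Pre_solution id_list report k → Spec_solution id_list report k (solution id_list report k)

-- ===== LEMMAS AND PROOFS =====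

theorem pv_update_self (l : List String) (s : PySem.Set String) (h : ∀ x ∈ l, x ∈ s) :
    PySem.Set.update s l = s := by
  induction l generalizing s with
  | nil => rfl
  | cons a t ih =>
    have ha : a ∈ s := h a (by simp)
    have : PySem.Set.add s a = s := by simp [PySem.Set.add, ha]
    show PySem.Set.update (PySem.Set.add s a) t = s
    rw [this]
    exact ih s (fun x hx => h x (by simp [hx]))

theorem pv_getD_insert_const {ν : Type} (l : List String) (c dflt : ν) (d : PySem.Dict String ν) (x : String) :
    (l.foldl (fun d j => d.insert j c) d).getD x dflt = if x ∈ l then c else d.getD x dflt := by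
  induction l generalizing d with
  | nil => simp
  | cons a t ih =>
    simp only [List.foldl_cons, ih, PySem.Dict.getD_insert, List.mem_cons]
    by_cases hx : x ∈ t <;> by_cases hxa : x = a <;> simp [hx, hxa]

-- the inner credit loop over one reporter group keeps the key set when every reporter is a key
theorem pv_inner_keys (srcs : List String) (d : PySem.Dict String Int)
    (h : ∀ s ∈ srcs, s ∈ d.keys) :
    (srcs.foldl (fun d s => d.insert s (d.getD s 0 + 1)) d).keys = d.keys := by
  induction srcs generalizing d with
  | nil => rfl
  | cons a t ih =>
    have hc : d.contains a = true := (PySem.Dict.contains_iff_mem_keys _ _).mpr (h a (by simp))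
    have hk : (d.insert a (d.getD a 0 + 1)).keys = d.keys :=
      PySem.Dict.keys_insert_of_contains _ _ hc
    simp only [List.foldl_cons]
    rw [ih _ (fun s hs => by rw [hk]; exact h s (by simp [hs])), hk]

-- the outer banned-group loop keeps the key set
theorem pv_group_keys (ts : List String) (g : String → List String) (k : Int) (d : PySem.Dict String Int)
    (h : ∀ t ∈ ts, ∀ s ∈ g t, s ∈ d.keys) :
    (ts.foldl (fun d t => if k ≤ ((g t).length : Int)
        then (g t).foldl (fun d s => d.insert s (d.getD s 0 + 1)) d else d) d).keys = d.keys := by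
  induction ts generalizing d with
  | nil => rfl
  | cons a t ih =>
    simp only [List.foldl_cons]
    by_cases hp : k ≤ ((g a).length : Int)
    · rw [if_pos hp]
      have hk : ((g a).foldl (fun d s => d.insert s (d.getD s 0 + 1)) d).keys = d.keys :=
        pv_inner_keys _ _ (h a (by simp))
      rw [ih _ (fun t' ht' s hs => by rw [hk]; exact h t' (by simp [ht']) s hs), hk]
    · rw [if_neg hp]
      exact ih _ (fun t' ht' s hs => h t' (by simp [ht']) s hs)

-- value of one credit cell after the banned-group loop: a sum over the groups
theorem pv_group_getD (ts : List String) (g : String → List String) (k : Int)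
    (d : PySem.Dict String Int) (m : String) :
    (ts.foldl (fun d t => if k ≤ ((g t).length : Int)
        then (g t).foldl (fun d s => d.insert s (d.getD s 0 + 1)) d else d) d).getD m 0
      = d.getD m 0 + (ts.map (fun t => if k ≤ ((g t).length : Int)
          then (((g t).count m : Nat) : Int) else 0)).sum := by
  induction ts generalizing d with
  | nil => simp
  | cons a t ih =>
    simp only [List.foldl_cons, List.map_cons, List.sum_cons]
    by_cases hp : k ≤ ((g a).length : Int)
    · rw [if_pos hp, if_pos hp, ih, PySem.Dict.getD_foldl_insert_add_one]
      ring
    · rw [if_neg hp, if_neg hp, ih]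
      ring

-- partitioning a countP over the distinct values of the second component
theorem pv_sum_group (l : List (String × String)) (R : String × String → Bool) (ts : List String)
    (hnd : ts.Nodup) (hc : ∀ p ∈ l, p.2 ∈ ts) :
    (ts.map (fun t => l.countP (fun p => R p && (p.2 == t)))).sum = l.countP R := by
  induction l with
  | nil => simp
  | cons a l ih =>
    simp only [List.countP_cons]
    have hsplit : (ts.map (fun t => l.countP (fun p => R p && (p.2 == t)) +
        if (R a && (a.2 == t)) = true then 1 else 0)).sum
        = (ts.map (fun t => l.countP (fun p => R p && (p.2 == t)))).sum
          + (ts.map (fun t => if (R a && (a.2 == t)) = true then 1 else 0)).sum :=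
      List.sum_map_add
    rw [hsplit, ih (fun p hp => hc p (by simp [hp]))]
    congr 1
    by_cases hR : R a = true
    · rw [if_pos hR]
      simp only [hR, Bool.true_and]
      rw [PySem.List.sum_map_ite_one_zero_nat]
      have : ts.countP (fun t => a.2 == t) = ts.count a.2 := by
        apply List.countP_congr
        intro t _
        simp only [beq_iff_eq]
        exact eq_comm
      rw [this, List.count_eq_one_of_mem hnd (hc a (by simp))]
    · rw [if_neg hR]
      have hRf : R a = false := by simpa using hR
      simp [hRf]

-- the heart of the equivalence: A's per-reporter counting equals B's credit distribution
theorem pv_core (idl rep : List String) (k : Int) (F : String → String × String)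
    (hF : ∀ r ∈ rep, (F r).1 ∈ idl ∧ (F r).2 ∈ idl) :
    List.foldl (fun answer m =>
        answer ++ [List.foldl
            (fun count l => if k ≤ (List.foldl (fun d i => d.modify (F i).2 0 fun x => x + 1)
                (List.foldl (fun d j => d.insert j (0 : Int)) PySem.Dict.empty idl) rep).getD l 0
              then count + 1 else count) (0 : Int)
            ((List.foldl (fun d i => d.modify (F i).1 [] fun x => x ++ [(F i).2])
                (List.foldl (fun d j => d.insert j ([] : List String)) PySem.Dict.empty idl) rep).getD m [])]) []
      (List.foldl (fun d i => d.modify (F i).1 [] fun x => x ++ [(F i).2])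
          (List.foldl (fun d j => d.insert j ([] : List String)) PySem.Dict.empty idl) rep).keys
    = (List.foldl (fun d srcs => if k ≤ (srcs.length : Int)
          then srcs.foldl (fun d s => d.insert s (d.getD s 0 + 1)) d else d)
        (List.foldl (fun d j => d.insert j (0 : Int)) PySem.Dict.empty idl)
        (List.foldl (fun d i => d.modify (F i).2 [] fun x => x ++ [(F i).1])
            (PySem.Dict.empty : PySem.Dict String (List String)) rep).values).values := by
  have hofupd : ∀ (l : List String), PySem.Set.update ([] : PySem.Set String) l = PySem.Set.ofList l := by
    intro l; rw [PySem.Set.ofList_eq_foldl]; rfl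
  set pairs := rep.map F with hpairs
  set seconds := pairs.map (fun p => p.2) with hseconds
  set swp := pairs.map (fun p => (p.2, p.1)) with hswp
  set rt0 : PySem.Dict String Int := List.foldl (fun d j => d.insert j (0 : Int)) PySem.Dict.empty idl with hrt0
  set rp0 : PySem.Dict String (List String) := List.foldl (fun d j => d.insert j ([] : List String)) PySem.Dict.empty idl with hrp0
  set rtF := List.foldl (fun d i => d.modify (F i).2 0 fun x => x + 1) rt0 rep with hrtF
  set rpF := List.foldl (fun d i => d.modify (F i).1 [] fun x => x ++ [(F i).2]) rp0 rep with hrpF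
  set ro := List.foldl (fun d i => d.modify (F i).2 [] fun x => x ++ [(F i).1])
      (PySem.Dict.empty : PySem.Dict String (List String)) rep with hro
  -- shared facts about the seeded credit/count dict
  have hrt0keys : rt0.keys = PySem.Set.ofList idl := by
    rw [hrt0, PySem.Dict.keys_foldl_insert, PySem.Dict.keys_empty, hofupd]
  have hrt0getD : ∀ v, rt0.getD v 0 = 0 := by
    intro v; rw [hrt0, pv_getD_insert_const]; split <;> simp
  -- A side: reported_time counts, report_people groups
  have hrtFe : rtF = List.foldl (fun d x => d.modify x 0 fun y => y + 1) rt0 seconds := by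
    rw [hrtF, hseconds, hpairs]
    conv_rhs => rw [List.foldl_map, List.foldl_map]
  have hrtFgetD : ∀ v, rtF.getD v 0 = ((seconds.count v : Nat) : Int) := by
    intro v; rw [hrtFe, PySem.Dict.getD_foldl_modify_add_one, hrt0getD]; simp
  have hrp0keys : rp0.keys = PySem.Set.ofList idl := by
    rw [hrp0, PySem.Dict.keys_foldl_insert, PySem.Dict.keys_empty, hofupd]
  have hrp0getD : ∀ m, rp0.getD m [] = [] := by
    intro m; rw [hrp0, pv_getD_insert_const]; split <;> simp
  have hrpFe : rpF = List.foldl (fun d p => d.modify p.1 [] fun x => x ++ [p.2]) rp0 pairs := by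
    rw [hrpF, hpairs]
    conv_rhs => rw [List.foldl_map]
  have hrpFgetD : ∀ m, rpF.getD m [] = (pairs.filter (fun p => p.1 == m)).map (fun x => x.2) := by
    intro m; rw [hrpFe, PySem.Dict.getD_foldl_modify_append, hrp0getD]; simp
  have hrpFkeys : rpF.keys = PySem.Set.ofList idl := by
    rw [hrpF, PySem.Dict.keys_foldl_modify_key (key := fun i => (F i).1), hrp0keys]
    refine pv_update_self _ _ ?_
    intro x hx
    rcases List.mem_map.mp hx with ⟨r, hr, rfl⟩
    exact (PySem.Set.mem_ofList _ _).mpr (hF r hr).1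
  -- B side: the inverse index target → reporters
  have hroe : ro = List.foldl (fun d q => d.modify q.1 [] fun x => x ++ [q.2])
      (PySem.Dict.empty : PySem.Dict String (List String)) swp := by
    rw [hro, hswp, hpairs]
    conv_rhs => rw [List.foldl_map, List.foldl_map]
  have hrogetD : ∀ t, ro.getD t [] = (swp.filter (fun q => q.1 == t)).map (fun q => q.2) := by
    intro t; rw [hroe, PySem.Dict.getD_foldl_modify_append]; simp
  have hrokeys : ro.keys = PySem.Set.ofList seconds := by
    rw [hroe, PySem.Dict.keys_foldl_modify_key (key := fun q : String × String => q.1),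
      PySem.Dict.keys_empty, hofupd, hswp, List.map_map]
    rfl
  have hronodup : ro.keys.Nodup := by
    rw [hrokeys]; exact PySem.Set.nodup_ofList _
  have hrovals : ro.values = (PySem.Set.ofList seconds).map (fun t => ro.getD t []) := by
    rw [PySem.Dict.values_eq_map_keys ro hronodup [], hrokeys]
  -- the shared per-pair predicate
  set R : String → String × String → Bool :=
      fun m p => decide (k ≤ ((seconds.count p.2 : Nat) : Int)) && (p.1 == m) with hR
  have hglen : ∀ t : String, (((ro.getD t []).length : Nat) : Int) = ((seconds.count t : Nat) : Int) := by
    intro t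
    congr 1
    rw [hrogetD, List.length_map, ← List.countP_eq_length_filter, hswp, hseconds]
    simp [List.count_eq_countP, List.countP_map]
    rfl
  have hgcount : ∀ t m : String, (ro.getD t []).count m = pairs.countP (fun p => (p.1 == m) && (p.2 == t)) := by
    intro t m
    rw [hrogetD, hswp]
    simp [List.count_eq_countP, List.countP_map, List.countP_filter]
    rfl
  -- the credit dict
  set credit := List.foldl (fun d srcs => if k ≤ (srcs.length : Int)
      then srcs.foldl (fun d s => d.insert s (d.getD s 0 + 1)) d else d) rt0 ro.values with hcredit
  have hcredite : credit = List.foldl (fun d t => if k ≤ ((ro.getD t []).length : Int)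
      then (ro.getD t []).foldl (fun d s => d.insert s (d.getD s 0 + 1)) d else d) rt0 (PySem.Set.ofList seconds) := by
    rw [hcredit, hrovals]
    simp only [List.foldl_map]
  have hsrc_mem : ∀ t : String, ∀ s ∈ ro.getD t [], s ∈ rt0.keys := by
    intro t s hs
    rw [hrogetD] at hs
    rcases List.mem_map.mp hs with ⟨q, hq, rfl⟩
    have hq' : q ∈ swp := (List.mem_filter.mp hq).1
    rw [hswp] at hq'
    rcases List.mem_map.mp hq' with ⟨p, hp, rfl⟩
    rw [hpairs] at hp
    rcases List.mem_map.mp hp with ⟨r, hr, rfl⟩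
    rw [hrt0keys]
    exact (PySem.Set.mem_ofList _ _).mpr (hF r hr).1
  have hcreditkeys : credit.keys = PySem.Set.ofList idl := by
    have hgk := pv_group_keys (PySem.Set.ofList seconds) (fun t => ro.getD t []) k rt0
      (fun t _ s hs => hsrc_mem t s hs)
    beta_reduce at hgk
    rw [hcredite, hgk, hrt0keys]
  have hcreditnodup : credit.keys.Nodup := by
    rw [hcreditkeys]; exact PySem.Set.nodup_ofList _
  -- per-cell value of credit: the partitioned count
  have hcreditgetD : ∀ m, credit.getD m 0 = ((pairs.countP (R m) : Nat) : Int) := by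
    intro m
    have hgd := pv_group_getD (PySem.Set.ofList seconds) (fun t => ro.getD t []) k rt0 m
    beta_reduce at hgd
    rw [hcredite, hgd, hrt0getD, zero_add]
    have hterm : ∀ t ∈ PySem.Set.ofList seconds,
        (if k ≤ ((ro.getD t []).length : Int) then (((ro.getD t []).count m : Nat) : Int) else 0)
          = ((pairs.countP (fun p => R m p && (p.2 == t)) : Nat) : Int) := by
      intro t _
      rw [hglen, hgcount]
      by_cases hk : k ≤ ((seconds.count t : Nat) : Int)
      · rw [if_pos hk]
        congr 1
        apply List.countP_congr
        intro p _
        simp only [hR, Bool.and_eq_true, decide_eq_true_eq, beq_iff_eq]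
        constructor
        · rintro ⟨h1, h2⟩; exact ⟨⟨by rw [h2]; exact hk, h1⟩, h2⟩
        · rintro ⟨⟨_, h1⟩, h2⟩; exact ⟨h1, h2⟩
      · rw [if_neg hk]
        have hz : pairs.countP (fun p => R m p && (p.2 == t)) = 0 := by
          rw [List.countP_eq_zero]
          intro p _
          simp only [hR, Bool.and_eq_true, decide_eq_true_eq, beq_iff_eq]
          rintro ⟨⟨h1, _⟩, h2⟩
          rw [h2] at h1
          exact hk h1
        simp [hz]
    rw [List.map_congr_left hterm]
    have hcast : ((PySem.Set.ofList seconds).map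
          (fun t => ((pairs.countP (fun p => R m p && (p.2 == t)) : Nat) : Int))).sum
        = (((PySem.Set.ofList seconds).map
          (fun t => pairs.countP (fun p => R m p && (p.2 == t)))).sum : Nat) := by
      rw [Nat.cast_list_sum, List.map_map]
      rfl
    rw [hcast, pv_sum_group pairs (R m) _ (PySem.Set.nodup_ofList _)
      (fun p hp => (PySem.Set.mem_ofList _ _).mpr (by rw [hseconds]; exact List.mem_map_of_mem hp))]
  -- assemble both sides as maps over the deduplicated id list
  rw [PySem.List.foldl_append_singleton_eq_map, List.nil_append,
    PySem.Dict.values_eq_map_keys credit hcreditnodup 0, hcreditkeys, hrpFkeys]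
  apply List.map_congr_left
  intro m _
  rw [hcreditgetD, hrpFgetD]
  have hcnt : List.foldl (fun count l => if k ≤ rtF.getD l 0 then count + 1 else count) (0 : Int)
      ((pairs.filter (fun p => p.1 == m)).map (fun x => x.2))
      = (0 : Int) + ((((pairs.filter (fun p => p.1 == m)).map (fun x => x.2)).countP
          (fun l => decide (k ≤ rtF.getD l 0)) : Nat) : Int) := by
    simpa using PySem.List.foldl_count_if (fun l => decide (k ≤ rtF.getD l 0))
      ((pairs.filter (fun p => p.1 == m)).map (fun x => x.2)) 0
  rw [hcnt, List.countP_map, List.countP_filter, zero_add]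
  congr 1
  apply List.countP_congr
  intro p _
  simp [hR, hrtFgetD]

theorem solution_spec_main (id_list : List String) (report : List String) (k : Int)
    (hpre : Pre_solution id_list report k) :
    solution id_list report k = solution_alt id_list report k := by
  have hmem : ∀ r ∈ report,
      (((PySem.Str.split? r " ").getD []).getD 0 "") ∈ id_list ∧
      (((PySem.Str.split? r " ").getD []).getD 1 "") ∈ id_list := by
    intro r hr
    have h := (List.all_eq_true.mp hpre) r hr
    revert h
    cases hsp : PySem.Str.split? r " " with
    | none => simp
    | some l =>
      rcases l with _ | ⟨a, _ | ⟨b, _ | ⟨c, t⟩⟩⟩ <;> simp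
  simp only [solution, solution_alt]
  rw [PySem.List.foldl_prod_mk
    (f := fun (d : PySem.Dict String Int) (i : String) =>
      d.modify (((PySem.Str.split? i " ").getD []).getD 1 "") 0 (· + 1))
    (g := fun (d : PySem.Dict String (List String)) (i : String) =>
      d.modify (((PySem.Str.split? i " ").getD []).getD 0 "") [] (· ++ [((PySem.Str.split? i " ").getD []).getD 1 ""]))]
  exact pv_core id_list (PySem.Set.ofList report) k
    (fun r => ((((PySem.Str.split? r " ").getD []).getD 0 ""), (((PySem.Str.split? r " ").getD []).getD 1 "")))
    (fun r hr => hmem r ((PySem.Set.mem_ofList _ _).mp hr))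

-- ===== VERDICT (by name: the statement is the Claim_ definition above) =====
theorem solution_spec : Claim_equal_solution := by
  intro id_list report k _ hpre
  unfold Spec_solution
  exact solution_spec_main id_list report k hpre
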